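-- pv_equiv track=rewrite | github.com/Safaet-Rabbi/Python | Codeforce/1296B.py | max_spent_burles
-- ===== SOURCE A (Python) =====
-- def max_spent_burles(t, test_cases):
--     results = []
--     for s in test_cases:
--         total_spent = 0
--         while s >= 10:
--             spend = s - (s % 10)
--             cashback = spend // 10
--             total_spent += spend
--             s = s - spend + cashback
--         total_spent += s
--         results.append(total_spent)
--     return results
-- ===== SOURCE B (Python) =====
-- def max_spent_burles(t, test_cases):
--     # Closed form: spending with 10% cashback totals s + (s-1)//9 for s > 0.
--     return [s + (s - 1) // 9 if s > 0 else s for s in test_cases]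
-- ===== Notes on version B (the rewrite author's own statement) =====
-- stated objective: faster
-- what changed: Replaces the per-test-case cashback simulation loop with the closed form s + (s-1)//9 (for s > 0), computed in a single list comprehension.
import Mathlib
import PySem

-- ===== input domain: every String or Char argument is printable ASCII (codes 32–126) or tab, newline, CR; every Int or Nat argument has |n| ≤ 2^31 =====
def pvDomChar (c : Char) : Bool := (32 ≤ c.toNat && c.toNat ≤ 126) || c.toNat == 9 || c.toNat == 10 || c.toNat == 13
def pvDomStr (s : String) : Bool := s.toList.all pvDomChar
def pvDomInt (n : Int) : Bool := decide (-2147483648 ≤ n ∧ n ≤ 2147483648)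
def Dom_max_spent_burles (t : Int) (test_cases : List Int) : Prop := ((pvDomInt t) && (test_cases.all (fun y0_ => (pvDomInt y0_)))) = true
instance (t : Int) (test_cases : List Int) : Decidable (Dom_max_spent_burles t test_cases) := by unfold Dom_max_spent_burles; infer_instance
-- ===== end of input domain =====

-- B replaces A's per-test-case cashback simulation loop with the closed form s + (s-1)//9 for s > 0 (faster).


-- ===== PORT A =====
-- the while loop of A: state (s, total_spent)
def msbLoop (s : Int) (total : Int) : Int :=
  if h : 10 ≤ s then
    msbLoop (s - (s - PySem.Int.mod s 10) + PySem.Int.floordiv (s - PySem.Int.mod s 10) 10)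
            (total + (s - PySem.Int.mod s 10))
  else total + s
termination_by s.toNat
decreasing_by
  simp only [PySem.Int.mod_eq_emod_of_pos (a := s) (by norm_num : (0:Int) < 10),
    PySem.Int.floordiv_eq_ediv_of_pos (by norm_num : (0:Int) < 10)]
  omega

def max_spent_burles (t : Int) (test_cases : List Int) : List Int :=
  test_cases.foldl (fun results s => results ++ [msbLoop s 0]) []

-- ===== PORT B =====
def max_spent_burles_alt (t : Int) (test_cases : List Int) : List Int :=
  test_cases.map (fun s => if 0 < s then s + PySem.Int.floordiv (s - 1) 9 else s)

-- ===== PRECONDITION & SPEC =====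
def Spec_max_spent_burles (t : Int) (test_cases : List Int) (out : List Int) : Prop := out = max_spent_burles_alt t test_cases
instance (t : Int) (test_cases : List Int) (out : List Int) : Decidable (Spec_max_spent_burles t test_cases out) := by unfold Spec_max_spent_burles; infer_instance

-- ===== CLAIM (what is proved, stated in full; the proofs are below) =====
def Claim_equal_max_spent_burles : Prop := ∀ (t : Int) (test_cases : List Int), Dom_max_spent_burles t test_cases → Spec_max_spent_burles t test_cases (max_spent_burles t test_cases)

-- ===== LEMMAS AND PROOFS =====

-- the loop computes total plus the closed form
theorem msbLoop_eq (s total : Int) :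
    msbLoop s total = total + (if 0 < s then s + PySem.Int.floordiv (s - 1) 9 else s) := by
  induction s, total using msbLoop.induct with
  | case1 s total h ih =>
    rw [msbLoop]
    simp only [h, dif_pos, ih]
    simp only [PySem.Int.mod_eq_emod_of_pos (a := s) (by norm_num : (0:Int) < 10),
      PySem.Int.floordiv_eq_ediv_of_pos (by norm_num : (0:Int) < 10),
      PySem.Int.floordiv_eq_ediv_of_pos (by norm_num : (0:Int) < 9)]
    split_ifs <;> omega
  | case2 s total h =>
    rw [msbLoop]
    simp only [h, dif_neg, not_false_iff]
    split_ifs with h0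
    · have : PySem.Int.floordiv (s - 1) 9 = (s - 1) / 9 :=
        PySem.Int.floordiv_eq_ediv_of_pos (by norm_num)
      rw [this]; omega
    · ring

theorem foldl_append_map (l : List Int) (acc : List Int) :
    l.foldl (fun results s => results ++ [msbLoop s 0]) acc
      = acc ++ l.map (fun s => if 0 < s then s + PySem.Int.floordiv (s - 1) 9 else s) := by
  induction l generalizing acc with
  | nil => simp
  | cons x xs ih =>
    rw [List.foldl_cons, ih, msbLoop_eq]
    simp [List.append_assoc]

-- ===== VERDICT (by name: the statement is the Claim_ definition above) =====
theorem max_spent_burles_spec : Claim_equal_max_spent_burles := by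
  intro t test_cases _
  unfold Spec_max_spent_burles max_spent_burles max_spent_burles_alt
  simpa using foldl_append_map test_cases []
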